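-- pv_equiv track=rewrite | github.com/Rasa-X-Machina/AugurOmega-MidBuild | augur-omega/security/viper_integration.py | _calculate_infrastructure_metrics
-- ===== SOURCE A (Python) =====
-- from typing import Dict, Any, List, Optional
--
-- def _calculate_infrastructure_metrics(viper_results: Dict[str, Any]) -> Dict[str, Any]:
--     """Calculate infrastructure security metrics"""
--     metrics = {
--         'total_findings': 0,
--         'critical_vulnerabilities': 0,
--         'high_vulnerabilities': 0,
--         'exposed_services': 0,
--         'configuration_issues': 0,
--         'authentication_bypasses': 0
--     }
--
--     findings = viper_results.get('raw_results', {}).get('findings', [])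
--
--     for finding in findings:
--         metrics['total_findings'] += 1
--         severity = finding.get('severity', 'info')
--
--         if severity == 'critical':
--             metrics['critical_vulnerabilities'] += 1
--         elif severity == 'high':
--             metrics['high_vulnerabilities'] += 1
--
--         # Count specific issue types
--         finding_type = finding.get('type', 'unknown')
--         if 'service' in finding_type:
--             metrics['exposed_services'] += 1
--         elif 'config' in finding_type or 'misconfig' in finding_type:
--             metrics['configuration_issues'] += 1
--         elif 'auth' in finding_type or 'bypass' in finding_type:
--             metrics['authentication_bypasses'] += 1
--
--     return metrics
-- ===== SOURCE B (Python) =====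
-- def _calculate_infrastructure_metrics(viper_results):
--     """Calculate infrastructure security metrics (per-metric passes)."""
--     findings = viper_results.get('raw_results', {}).get('findings', [])
--
--     def sev(f):
--         return f.get('severity', 'info')
--
--     def typ(f):
--         return f.get('type', 'unknown')
--
--     return {
--         'total_findings': len(findings),
--         'critical_vulnerabilities': sum(1 for f in findings if sev(f) == 'critical'),
--         'high_vulnerabilities': sum(1 for f in findings if sev(f) == 'high'),
--         'exposed_services': sum(1 for f in findings if 'service' in typ(f)),
--         'configuration_issues': sum(
--             1 for f in findings
--             if 'service' not in typ(f) and ('config' in typ(f) or 'misconfig' in typ(f))),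
--         'authentication_bypasses': sum(
--             1 for f in findings
--             if 'service' not in typ(f)
--             and not ('config' in typ(f) or 'misconfig' in typ(f))
--             and ('auth' in typ(f) or 'bypass' in typ(f))),
--     }
-- ===== Notes on version B (the rewrite author's own statement) =====
-- stated objective: alternative
-- what changed: Replaces the single accumulating loop that increments six dict counters with one independent counting pass per metric (len plus five sum-of-generator counts, with the elif exclusivity made explicit as negated conditions).
import Mathlib
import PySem

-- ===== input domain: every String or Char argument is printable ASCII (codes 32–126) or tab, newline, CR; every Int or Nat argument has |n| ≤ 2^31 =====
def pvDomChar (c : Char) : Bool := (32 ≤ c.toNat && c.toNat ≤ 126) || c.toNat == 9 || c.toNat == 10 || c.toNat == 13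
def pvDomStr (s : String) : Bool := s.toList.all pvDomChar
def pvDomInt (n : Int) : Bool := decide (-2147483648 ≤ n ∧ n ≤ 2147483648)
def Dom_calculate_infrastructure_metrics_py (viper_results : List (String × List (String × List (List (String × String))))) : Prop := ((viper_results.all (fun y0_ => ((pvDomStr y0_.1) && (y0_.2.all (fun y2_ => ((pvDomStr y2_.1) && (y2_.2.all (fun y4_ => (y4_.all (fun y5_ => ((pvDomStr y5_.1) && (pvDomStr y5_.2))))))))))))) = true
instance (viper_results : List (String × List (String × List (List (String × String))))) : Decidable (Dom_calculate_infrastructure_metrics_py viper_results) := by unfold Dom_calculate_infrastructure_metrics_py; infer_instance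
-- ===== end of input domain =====

-- B replaces A's single six-counter accumulating loop by one independent counting pass per metric; objective: alternative decomposition (same cost).
-- ===== PORT A =====
-- shared with port B: f.get('severity', 'info') and f.get('type', 'unknown')
def pvSev (f : List (String × String)) : String := (PySem.Dict.mk f).getD "severity" "info"
def pvTyp (f : List (String × String)) : String := (PySem.Dict.mk f).getD "type" "unknown"

def pvStepA (m : Int × Int × Int × Int × Int × Int) (finding : List (String × String)) :
    Int × Int × Int × Int × Int × Int :=
  match m with
  | (tot, crit, high, serv, conf, auth) =>
    let tot := tot + 1
    let severity := pvSev finding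
    let (crit, high) :=
      if severity == "critical" then (crit + 1, high)
      else if severity == "high" then (crit, high + 1)
      else (crit, high)
    let ft := pvTyp finding
    let (serv, conf, auth) :=
      if PySem.Str.isIn "service" ft then (serv + 1, conf, auth)
      else if PySem.Str.isIn "config" ft || PySem.Str.isIn "misconfig" ft then (serv, conf + 1, auth)
      else if PySem.Str.isIn "auth" ft || PySem.Str.isIn "bypass" ft then (serv, conf, auth + 1)
      else (serv, conf, auth)
    (tot, crit, high, serv, conf, auth)

def calculate_infrastructure_metrics_py (viper_results : List (String × List (String × List (List (String × String))))) : List (String × Int) :=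
  -- metrics dict with six fixed keys, kept as a six-Int state in insertion order
  let raw := (PySem.Dict.mk viper_results).getD "raw_results" []
  let findings := (PySem.Dict.mk raw).getD "findings" []
  let m := findings.foldl pvStepA (0, 0, 0, 0, 0, 0)
  [("total_findings", m.1), ("critical_vulnerabilities", m.2.1),
   ("high_vulnerabilities", m.2.2.1), ("exposed_services", m.2.2.2.1),
   ("configuration_issues", m.2.2.2.2.1), ("authentication_bypasses", m.2.2.2.2.2)]

-- ===== PORT B =====
def calculate_infrastructure_metrics_py_alt (viper_results : List (String × List (String × List (List (String × String))))) : List (String × Int) :=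
  let findings := (PySem.Dict.mk ((PySem.Dict.mk viper_results).getD "raw_results" [])).getD "findings" []
  [("total_findings", (findings.length : Int)),
   ("critical_vulnerabilities", (findings.countP (fun f => pvSev f == "critical") : Int)),
   ("high_vulnerabilities", (findings.countP (fun f => pvSev f == "high") : Int)),
   ("exposed_services", (findings.countP (fun f => PySem.Str.isIn "service" (pvTyp f)) : Int)),
   ("configuration_issues", (findings.countP (fun f =>
      !PySem.Str.isIn "service" (pvTyp f) &&
      (PySem.Str.isIn "config" (pvTyp f) || PySem.Str.isIn "misconfig" (pvTyp f))) : Int)),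
   ("authentication_bypasses", (findings.countP (fun f =>
      !PySem.Str.isIn "service" (pvTyp f) &&
      !(PySem.Str.isIn "config" (pvTyp f) || PySem.Str.isIn "misconfig" (pvTyp f)) &&
      (PySem.Str.isIn "auth" (pvTyp f) || PySem.Str.isIn "bypass" (pvTyp f))) : Int))]
-- ===== PRECONDITION & SPEC =====
def Spec_calculate_infrastructure_metrics_py (viper_results : List (String × List (String × List (List (String × String))))) (out : List (String × Int)) : Prop := out = calculate_infrastructure_metrics_py_alt viper_results
instance (viper_results : List (String × List (String × List (List (String × String))))) (out : List (String × Int)) : Decidable (Spec_calculate_infrastructure_metrics_py viper_results out) := by unfold Spec_calculate_infrastructure_metrics_py; infer_instance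

-- ===== CLAIM (what is proved, stated in full; the proofs are below) =====
def Claim_equal_calculate_infrastructure_metrics_py : Prop := ∀ (viper_results : List (String × List (String × List (List (String × String))))), Dom_calculate_infrastructure_metrics_py viper_results → Spec_calculate_infrastructure_metrics_py viper_results (calculate_infrastructure_metrics_py viper_results)

-- ===== LEMMAS AND PROOFS =====

-- ===== VERDICT (by name: the statement is the Claim_ definition above) =====
lemma pvFoldA (fs : List (List (String × String))) (t c h e ci a : Int) :
    fs.foldl pvStepA (t, c, h, e, ci, a) =
      (t + fs.length,
       c + fs.countP (fun f => pvSev f == "critical"),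
       h + fs.countP (fun f => pvSev f == "high"),
       e + fs.countP (fun f => PySem.Str.isIn "service" (pvTyp f)),
       ci + fs.countP (fun f =>
         !PySem.Str.isIn "service" (pvTyp f) &&
         (PySem.Str.isIn "config" (pvTyp f) || PySem.Str.isIn "misconfig" (pvTyp f))),
       a + fs.countP (fun f =>
         !PySem.Str.isIn "service" (pvTyp f) &&
         !(PySem.Str.isIn "config" (pvTyp f) || PySem.Str.isIn "misconfig" (pvTyp f)) &&
         (PySem.Str.isIn "auth" (pvTyp f) || PySem.Str.isIn "bypass" (pvTyp f)))) := by
  induction fs generalizing t c h e ci a with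
  | nil => simp
  | cons hd tl ih =>
    simp only [List.foldl_cons, pvStepA]
    split_ifs <;> rw [ih] <;> simp_all [List.countP_cons] <;> and_intros <;> first | omega | (intros; simp_all)

-- ===== VERDICT (by name: the statement is the Claim_ definition above) =====
theorem calculate_infrastructure_metrics_py_spec : Claim_equal_calculate_infrastructure_metrics_py := by
  intro vr _
  unfold Spec_calculate_infrastructure_metrics_py
  simp [calculate_infrastructure_metrics_py, calculate_infrastructure_metrics_py_alt, pvFoldA]
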